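-- pv_equiv track=rewrite | github.com/Matteo-Candi/Master-Thesis | benchmark/Python_formatted.py | distinct_substring
-- ===== SOURCE A (Python) =====
-- def distinct_substring(p, q, k, n):
--     ss = set()
--     for i in range(n):
--         sum = 0
--         s = ""
--         for j in range(i, n):
--             pos = ord(p[j]) - ord('a')
--             sum += ord(q[pos]) - ord('0')
--             s += p[j]
--             if sum <= k:
--                 ss.add(s)
--             else:
--                 break
--     return len(ss)
-- ===== SOURCE B (Python) =====
-- def distinct_substring(p, q, k, n):
--     # Counts distinct admissible substrings by inserting them into a trie
--     # (transition dict keyed by (node_id, char)) and counting the created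
--     # nodes, instead of materialising the substrings themselves in a set.
--     trans = {}          # (node_id, char) -> node_id
--     nxt = 1             # next fresh node id; 0 is the root
--     for i in range(n):
--         node = 0
--         total = 0
--         for j in range(i, n):
--             total += ord(q[ord(p[j]) - ord('a')]) - ord('0')
--             if total > k:
--                 break
--             key = (node, p[j])
--             child = trans.get(key)
--             if child is None:
--                 trans[key] = nxt
--                 node = nxt
--                 nxt += 1
--             else:
--                 node = child
--     return nxt - 1
-- ===== Notes on version B (the rewrite author's own statement) =====
-- stated objective: alternative
-- what changed: B replaces A's set of materialised substrings by a trie stored as a transition dictionary keyed by (node_id, char) and returns the number of trie nodes created, so no substring string is ever built or hashed.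
import Mathlib
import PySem

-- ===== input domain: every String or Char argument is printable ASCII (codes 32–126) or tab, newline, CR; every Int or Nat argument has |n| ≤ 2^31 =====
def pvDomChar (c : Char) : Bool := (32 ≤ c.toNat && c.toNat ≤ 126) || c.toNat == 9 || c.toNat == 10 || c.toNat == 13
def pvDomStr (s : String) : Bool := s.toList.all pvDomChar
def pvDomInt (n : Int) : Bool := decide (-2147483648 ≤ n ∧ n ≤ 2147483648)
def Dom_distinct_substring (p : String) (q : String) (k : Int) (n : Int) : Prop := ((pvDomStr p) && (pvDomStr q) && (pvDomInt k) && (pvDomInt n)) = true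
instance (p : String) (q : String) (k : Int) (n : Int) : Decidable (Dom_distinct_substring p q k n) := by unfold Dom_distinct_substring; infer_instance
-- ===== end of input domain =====

-- B replaces A's set of substrings by a trie (a transition dict keyed by (node id, char))
-- and counts created nodes: no substring string is ever built or hashed.

-- ===== PORT A =====
-- inner 'for j in range(i, n)' loop of A: state (sum, s, ss); returns ss ('break' stops the recursion).
-- substrings are kept as List Char (String.push ported as ++ [c]); only the set's size is returned.
def distinctInnerA (pc qc : List Char) (k : Int) :
    List Int → Int → List Char → PySem.Set (List Char) → PySem.Set (List Char)
  | [], _, _, ss => ss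
  | j :: js, sum, s, ss =>
    let c := PySem.List.pyGetD pc j ' '
    let pos : Int := (c.toNat : Int) - 97
    let sum' := sum + (((PySem.List.pyGetD qc pos '0').toNat : Int) - 48)
    let s' := s ++ [c]
    if sum' ≤ k then distinctInnerA pc qc k js sum' s' (PySem.Set.add ss s')
    else ss

def distinct_substring (p : String) (q : String) (k : Int) (n : Int) : Int :=
  let pc := p.toList
  let qc := q.toList
  let ss := (PySem.List.pyRange 0 n 1).foldl
    (fun ss i => distinctInnerA pc qc k (PySem.List.pyRange i n 1) 0 [] ss)
    PySem.Set.empty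
  PySem.Set.len ss

-- ===== PORT B =====
-- inner loop of B: state (total, node, trans, nxt); returns (trans, nxt).
def distinctInnerB (pc qc : List Char) (k : Int) :
    List Int → Int → Int → PySem.Dict (Int × Char) Int → Int → PySem.Dict (Int × Char) Int × Int
  | [], _, _, tr, nxt => (tr, nxt)
  | j :: js, total, node, tr, nxt =>
    let c := PySem.List.pyGetD pc j ' '
    let pos : Int := (c.toNat : Int) - 97
    let total' := total + (((PySem.List.pyGetD qc pos '0').toNat : Int) - 48)
    if k < total' then (tr, nxt)
    else
      match tr.get? (node, c) with
      | some child => distinctInnerB pc qc k js total' child tr nxt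
      | none => distinctInnerB pc qc k js total' nxt (tr.insert (node, c) nxt) (nxt + 1)

def distinct_substring_alt (p : String) (q : String) (k : Int) (n : Int) : Int :=
  let pc := p.toList
  let qc := q.toList
  let st := (PySem.List.pyRange 0 n 1).foldl
    (fun st i => distinctInnerB pc qc k (PySem.List.pyRange i n 1) 0 0 st.1 st.2)
    (PySem.Dict.empty, 1)
  st.2 - 1

-- ===== PRECONDITION & SPEC =====
-- Pre_ excludes exactly the inputs where Python A raises an IndexError: it indexes p at every
-- j < n and q at ord(p[j]) - ord('a') (Python negative indexing allowed) before any break test.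
def Pre_distinct_substring (p : String) (q : String) (k : Int) (n : Int) : Prop :=
  n ≤ (p.toList.length : Int) ∧
  ((p.toList.take n.toNat).all
    (fun c => decide (PySem.Raise.InRange q.toList.length ((c.toNat : Int) - 97)))) = true
instance (p : String) (q : String) (k : Int) (n : Int) : Decidable (Pre_distinct_substring p q k n) := by
  unfold Pre_distinct_substring; infer_instance

def pvWitness_distinct_substring : String × String × Int × Int := ("abcab", "23456", 100, 5)

def Spec_distinct_substring (p : String) (q : String) (k : Int) (n : Int) (out : Int) : Prop := out = distinct_substring_alt p q k n
instance (p : String) (q : String) (k : Int) (n : Int) (out : Int) : Decidable (Spec_distinct_substring p q k n out) := by unfold Spec_distinct_substring; infer_instance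

-- ===== CLAIM (what is proved, stated in full; the proofs are below) =====
def Claim_equal_distinct_substring : Prop := ∀ (p : String) (q : String) (k : Int) (n : Int), Dom_distinct_substring p q k n → Pre_distinct_substring p q k n → Spec_distinct_substring p q k n (distinct_substring p q k n)

-- ===== LEMMAS AND PROOFS =====

-- the string spelled by trie node a: node 0 is the root (empty string), node m ≥ 1 is g[m-1],
-- where g lists the strings in node-creation order (= A's set in insertion order).
def nodeStr (g : List (List Char)) (a : Int) : Option (List Char) :=
  if a = 0 then some [] else if a < 0 then none else g[a.toNat - 1]?

-- the simulation invariant between A's set g and B's transition dict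
def TrieInv (g : List (List Char)) (trans : PySem.Dict (Int × Char) Int) : Prop :=
  g.Nodup ∧ [] ∉ g ∧
  (∀ s c, s ++ [c] ∈ g → s = [] ∨ s ∈ g) ∧
  (∀ a c b, trans.get? (a, c) = some b ↔
      ∃ sa, nodeStr g a = some sa ∧ nodeStr g b = some (sa ++ [c]) ∧ b ≠ 0)

lemma nodeStr_append (g : List (List Char)) (x : List Char) (a : Int) (s : List Char)
    (h : nodeStr g a = some s) : nodeStr (g ++ [x]) a = some s := by
  unfold nodeStr at *
  split_ifs at h ⊢ with h1 h2 <;> simp_all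
  have : a.toNat - 1 < g.length := by
    by_contra hc
    simp [List.getElem?_eq_none (by omega : g.length ≤ a.toNat - 1)] at h
  rw [List.getElem?_append_left this] at *
  exact h

lemma nodeStr_last (g : List (List Char)) (x : List Char) :
    nodeStr (g ++ [x]) ((g.length : Int) + 1) = some x := by
  unfold nodeStr
  have h0 : ¬ ((g.length : Int) + 1 = 0) := by omega
  have h1 : ¬ ((g.length : Int) + 1 < 0) := by omega
  simp only [h0, h1, if_false]
  have : ((g.length : Int) + 1).toNat - 1 = g.length := by omega
  rw [this, List.getElem?_append_right (le_refl _)]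
  simp

lemma nodeStr_of_ne_last (g : List (List Char)) (x : List Char) (a : Int) (s : List Char)
    (h : nodeStr (g ++ [x]) a = some s) (hne : a ≠ (g.length : Int) + 1) :
    nodeStr g a = some s := by
  unfold nodeStr at *
  split_ifs at h ⊢ with h1 h2 <;> simp_all
  have hlt : a.toNat - 1 < g.length + 1 := by
    by_contra hc
    simp [List.getElem?_eq_none (by simp; omega : (g ++ [x]).length ≤ a.toNat - 1)] at h
  have : a.toNat - 1 < g.length := by omega
  rw [List.getElem?_append_left this] at h
  exact h

lemma nodeStr_mem (g : List (List Char)) (a : Int) (s : List Char)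
    (h : nodeStr g a = some s) (ha : a ≠ 0) : s ∈ g := by
  unfold nodeStr at h
  split_ifs at h <;> simp_all
  exact List.mem_of_getElem? h

lemma mem_nodeStr (g : List (List Char)) (s : List Char) (h : s ∈ g) :
    ∃ b : Int, b ≠ 0 ∧ nodeStr g b = some s := by
  obtain ⟨i, hi, hget⟩ := List.getElem_of_mem h
  refine ⟨(i : Int) + 1, by omega, ?_⟩
  unfold nodeStr
  have h0 : ¬ ((i : Int) + 1 = 0) := by omega
  have h1 : ¬ ((i : Int) + 1 < 0) := by omega
  simp only [h0, h1, if_false]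
  have : ((i : Int) + 1).toNat - 1 = i := by omega
  rw [this, List.getElem?_eq_getElem hi, hget]

lemma nodeStr_inj (g : List (List Char)) (hnd : g.Nodup) (hnil : [] ∉ g)
    (a b : Int) (s : List Char) (ha : nodeStr g a = some s) (hb : nodeStr g b = some s) :
    a = b := by
  by_cases ha0 : a = 0
  · by_cases hb0 : b = 0
    · rw [ha0, hb0]
    · exfalso
      have hs : s = [] := by
        unfold nodeStr at ha; rw [if_pos ha0] at ha; simpa using ha.symm
      exact hnil (hs ▸ nodeStr_mem g b s hb hb0)
  · by_cases hb0 : b = 0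
    · exfalso
      have hs : s = [] := by
        unfold nodeStr at hb; rw [if_pos hb0] at hb; simpa using hb.symm
      exact hnil (hs ▸ nodeStr_mem g a s ha ha0)
    · unfold nodeStr at ha hb
      rw [if_neg ha0] at ha
      rw [if_neg hb0] at hb
      split_ifs at ha hb with hal hbl
      have hal' : a.toNat - 1 < g.length := by
        by_contra hc
        simp [List.getElem?_eq_none (by omega : g.length ≤ a.toNat - 1)] at ha
      have hbl' : b.toNat - 1 < g.length := by
        by_contra hc
        simp [List.getElem?_eq_none (by omega : g.length ≤ b.toNat - 1)] at hb
      rw [List.getElem?_eq_getElem hal'] at ha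
      rw [List.getElem?_eq_getElem hbl'] at hb
      simp only [Option.some.injEq] at ha hb
      have heq : a.toNat - 1 = b.toNat - 1 :=
        (List.Nodup.getElem_inj_iff hnd (hi := hal') (hj := hbl')).mp (by rw [ha, hb])
      omega

-- TrieInv is preserved when a fresh node (string x = s ++ [c], parent node a with string s) is added
lemma trieInv_insert (g : List (List Char)) (trans : PySem.Dict (Int × Char) Int)
    (hinv : TrieInv g trans) (a : Int) (s : List Char) (c : Char)
    (hna : nodeStr g a = some s) (hnotmem : s ++ [c] ∉ g) :
    TrieInv (g ++ [s ++ [c]]) (trans.insert (a, c) ((g.length : Int) + 1)) := by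
  obtain ⟨hnd, hnil, hpref, hiff⟩ := hinv
  have hnd' : (g ++ [s ++ [c]]).Nodup := by
    rw [List.nodup_append]
    refine ⟨hnd, List.nodup_singleton _, ?_⟩
    intro x hx y hy
    rw [List.mem_singleton] at hy
    subst hy
    exact fun he => hnotmem (he ▸ hx)
  refine ⟨hnd', ?_, ?_, ?_⟩
  · intro h
    rcases List.mem_append.mp h with h | h
    · exact hnil h
    · simp at h
  · intro t d ht
    rcases List.mem_append.mp ht with h | h
    · rcases hpref t d h with h' | h'
      · exact Or.inl h'
      · exact Or.inr (List.mem_append.mpr (Or.inl h'))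
    · simp only [List.mem_singleton] at h
      have hts : t = s := (List.append_inj' h rfl).1
      subst hts
      have hor : t = [] ∨ t ∈ g := by
        by_cases ha0 : a = 0
        · left; unfold nodeStr at hna; rw [if_pos ha0] at hna; simpa using hna.symm
        · right; exact nodeStr_mem g a t hna ha0
      rcases hor with h' | h'
      · exact Or.inl h'
      · exact Or.inr (List.mem_append.mpr (Or.inl h'))
  · intro a' c' b
    rw [PySem.Dict.get?_insert]
    by_cases hkey : (a', c') = (a, c)
    · have hk1 : a' = a := congrArg Prod.fst hkey
      have hk2 : c' = c := congrArg Prod.snd hkey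
      rw [if_pos hkey, hk1, hk2]
      constructor
      · intro h
        obtain rfl : b = (g.length : Int) + 1 := by simpa using h.symm
        exact ⟨s, nodeStr_append _ _ _ _ hna, nodeStr_last _ _, by omega⟩
      · rintro ⟨sa, hsa, hsb, hb0⟩
        have hsa' : sa = s := by
          rw [nodeStr_append g (s ++ [c]) a s hna] at hsa
          simpa using hsa.symm
        subst hsa'
        by_cases hbl : b = (g.length : Int) + 1
        · simp [hbl]
        · exact absurd (nodeStr_mem _ _ _ (nodeStr_of_ne_last _ _ _ _ hsb hbl) hb0) hnotmem
    · rw [if_neg hkey]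
      constructor
      · intro h
        obtain ⟨sa, hsa, hsb, hb0⟩ := (hiff a' c' b).mp h
        exact ⟨sa, nodeStr_append _ _ _ _ hsa, nodeStr_append _ _ _ _ hsb, hb0⟩
      · rintro ⟨sa, hsa, hsb, hb0⟩
        by_cases hbl : b = (g.length : Int) + 1
        · -- the child is the new node: then sa = s, c' = c, and the parent must be a — contradicting hkey
          subst hbl
          rw [nodeStr_last] at hsb
          have heq : sa ++ [c'] = s ++ [c] := by simpa using hsb.symm
          have e1 : sa = s := (List.append_inj' heq rfl).1
          have e2 : c' = c := by simpa using (List.append_inj' heq rfl).2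
          have ha0 : a' ≠ (g.length : Int) + 1 := by
            intro h0
            rw [h0, nodeStr_last] at hsa
            have h2 : s ++ [c] = sa := by simpa using hsa
            rw [e1] at h2
            have h3 := congrArg List.length h2
            simp at h3
          have haa : a' = a :=
            nodeStr_inj g hnd hnil a' a s (e1 ▸ nodeStr_of_ne_last _ _ _ _ hsa ha0) hna
          exact absurd (by rw [haa, e2]) hkey
        · have hsb' := nodeStr_of_ne_last _ _ _ _ hsb hbl
          have hsa' : nodeStr g a' = some sa := by
            by_cases ha0 : a' = (g.length : Int) + 1
            · exfalso
              rw [ha0, nodeStr_last] at hsa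
              obtain rfl : sa = s ++ [c] := by simpa using hsa.symm
              rcases hpref _ _ (nodeStr_mem _ _ _ hsb' hb0) with h' | h'
              · simp at h'
              · exact hnotmem h'
            · exact nodeStr_of_ne_last _ _ _ _ hsa ha0
          exact (hiff a' c' b).mpr ⟨sa, hsa', hsb', hb0⟩

-- the two inner loops run in lockstep: A's set evolves g ↦ g', B's trie keeps TrieInv and nxt = |g'| + 1
lemma inner_lockstep (pc qc : List Char) (k : Int) (js : List Int) :
    ∀ (g : List (List Char)) (trans : PySem.Dict (Int × Char) Int) (node : Int)
      (s : List Char) (sum : Int),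
      TrieInv g trans → nodeStr g node = some s →
      ∃ g' trans',
        distinctInnerA pc qc k js sum s g = g' ∧
        distinctInnerB pc qc k js sum node trans ((g.length : Int) + 1) = (trans', (g'.length : Int) + 1) ∧
        TrieInv g' trans' := by
  induction js with
  | nil => intro g trans node s sum hinv _; exact ⟨g, trans, rfl, rfl, hinv⟩
  | cons j js ih =>
    intro g trans node s sum hinv hns
    simp only [distinctInnerA, distinctInnerB]
    set c := PySem.List.pyGetD pc j ' ' with hc
    set sum' := sum + (((PySem.List.pyGetD qc ((c.toNat : Int) - 97) '0').toNat : Int) - 48) with hsum'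
    by_cases hk : sum' ≤ k
    · rw [if_pos hk, if_neg (by omega)]
      cases hget : trans.get? (node, c) with
      | some child =>
        obtain ⟨sa, hsa, hsb, hb0⟩ := (hinv.2.2.2 node c child).mp hget
        have hsas : sa = s := by rw [hns] at hsa; simpa using hsa.symm
        rw [hsas] at hsb
        have hmem : s ++ [c] ∈ g := nodeStr_mem _ _ _ hsb hb0
        rw [PySem.Set.add_of_mem hmem]
        exact ih g trans child (s ++ [c]) sum' hinv hsb
      | none =>
        have hnotmem : s ++ [c] ∉ g := by
          intro hmem
          obtain ⟨b, hb0, hnb⟩ := mem_nodeStr g (s ++ [c]) hmem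
          rw [(hinv.2.2.2 node c b).mpr ⟨s, hns, hnb, hb0⟩] at hget
          simp at hget
        rw [PySem.Set.add_of_not_mem hnotmem]
        have hinv' := trieInv_insert g trans hinv node s c hns hnotmem
        have hns' := nodeStr_last g (s ++ [c])
        obtain ⟨g', trans', hA, hB, hI⟩ :=
          ih (g ++ [s ++ [c]]) (trans.insert (node, c) ((g.length : Int) + 1))
            ((g.length : Int) + 1) (s ++ [c]) sum' hinv' hns'
        refine ⟨g', trans', hA, ?_, hI⟩
        rw [← hB]
        simp
    · rw [if_neg hk, if_pos (by omega)]
      exact ⟨g, trans, rfl, rfl, hinv⟩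

lemma outer_lockstep (pc qc : List Char) (k n : Int) (is : List Int) :
    ∀ (g : List (List Char)) (trans : PySem.Dict (Int × Char) Int),
      TrieInv g trans →
      ∃ g' trans',
        is.foldl (fun ss i => distinctInnerA pc qc k (PySem.List.pyRange i n 1) 0 [] ss) g = g' ∧
        is.foldl (fun st i => distinctInnerB pc qc k (PySem.List.pyRange i n 1) 0 0 st.1 st.2)
          (trans, (g.length : Int) + 1) = (trans', (g'.length : Int) + 1) ∧
        TrieInv g' trans' := by
  induction is with
  | nil => intro g trans hinv; exact ⟨g, trans, rfl, rfl, hinv⟩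
  | cons i is ih =>
    intro g trans hinv
    simp only [List.foldl_cons]
    obtain ⟨g1, trans1, hA1, hB1, hI1⟩ :=
      inner_lockstep pc qc k (PySem.List.pyRange i n 1) g trans 0 [] 0 hinv (by unfold nodeStr; simp)
    rw [hA1, hB1]
    exact ih g1 trans1 hI1

lemma trieInv_empty : TrieInv [] PySem.Dict.empty := by
  refine ⟨List.nodup_nil, by simp, by simp, ?_⟩
  intro a c b
  rw [PySem.Dict.get?_empty]
  constructor
  · intro h; simp at h
  · rintro ⟨sa, _, hsb, hb0⟩
    unfold nodeStr at hsb
    split_ifs at hsb <;> simp_all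

-- ===== VERDICT (by name: the statement is the Claim_ definition above) =====
theorem distinct_substring_spec : Claim_equal_distinct_substring := by
  intro p q k n _ _
  unfold Spec_distinct_substring distinct_substring distinct_substring_alt
  obtain ⟨g', trans', hA, hB, _⟩ :=
    outer_lockstep p.toList q.toList k n (PySem.List.pyRange 0 n 1) [] PySem.Dict.empty trieInv_empty
  simp only [List.length_nil, Nat.cast_zero, zero_add] at hB
  simp only [PySem.Set.empty] at hA ⊢
  rw [hA, hB]
  simp [PySem.Set.len]
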